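-- pv_equiv track=rewrite | github.com/code-study-classes/python-basics-andrewostt | practice_package/loops.py | count_vowel_triplets
-- ===== SOURCE A (Python) =====
-- def count_vowel_triplets(text, index=0):
--     vowels = {'a', 'e', 'i', 'o', 'u', 'y'}
--     text = text.lower()
--
--     def helper(i):
--         if i > len(text) - 3:
--             return 0
--         triplet = text[i:i + 3]
--         if all(ch in vowels for ch in triplet):
--             return 1 + helper(i + 3)
--         else:
--             return helper(i + 1)
--
--     return helper(0)
--     pass
-- ===== SOURCE B (Python) =====
-- def count_vowel_triplets(text, index=0):
--     vowels = "aeiouy"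
--     streak = 0
--     count = 0
--     for ch in text.lower():
--         if ch in vowels:
--             streak += 1
--             if streak == 3:
--                 count += 1
--                 streak = 0
--         else:
--             streak = 0
--     return count
-- ===== Notes on version B (the rewrite author's own statement) =====
-- stated objective: alternative
-- what changed: Replaced A's index-based recursion with slicing (re-slicing text[i:i+3] at each step) by a single left-to-right pass that keeps a running streak of consecutive vowels and counts every time the streak reaches 3, resetting it; the unused index parameter is kept.
import Mathlib
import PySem

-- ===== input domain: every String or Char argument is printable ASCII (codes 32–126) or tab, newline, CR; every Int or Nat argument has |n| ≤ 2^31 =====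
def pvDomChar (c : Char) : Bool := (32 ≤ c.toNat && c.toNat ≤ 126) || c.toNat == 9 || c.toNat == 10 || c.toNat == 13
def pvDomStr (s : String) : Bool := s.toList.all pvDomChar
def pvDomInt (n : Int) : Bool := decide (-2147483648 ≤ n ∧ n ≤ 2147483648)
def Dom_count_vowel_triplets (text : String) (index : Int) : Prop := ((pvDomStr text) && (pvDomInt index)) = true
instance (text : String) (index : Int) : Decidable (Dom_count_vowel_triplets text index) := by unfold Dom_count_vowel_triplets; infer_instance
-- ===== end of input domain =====

-- B replaces A's index/slice recursion by a single streak-counting pass; same return value, `index` stays unused.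

-- ===== PORT A =====
def pvVowelsA : PySem.Set Char := PySem.Set.ofList ['a', 'e', 'i', 'o', 'u', 'y']

def pvHelperA (t : List Char) (i : Nat) : Int :=
  if (i : Int) > (t.length : Int) - 3 then 0
  else
    let triplet := PySem.List.slice t (some (i : Int)) (some ((i : Int) + 3))
    if triplet.all (fun ch => PySem.Set.contains pvVowelsA ch) then
      1 + pvHelperA t (i + 3)
    else
      pvHelperA t (i + 1)
termination_by t.length - i
decreasing_by all_goals omega

def count_vowel_triplets (text : String) (index : Int) : Int :=
  pvHelperA (PySem.Str.lower text).toList 0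

-- ===== PORT B =====
def pvStepB (st : Int × Int) (ch : Char) : Int × Int :=
  if "aeiouy".toList.contains ch then
    let streak := st.1 + 1
    if streak == 3 then (0, st.2 + 1) else (streak, st.2)
  else
    (0, st.2)

def count_vowel_triplets_alt (text : String) (index : Int) : Int :=
  ((PySem.Str.lower text).toList.foldl pvStepB (0, 0)).2

-- ===== PRECONDITION & SPEC =====
def Spec_count_vowel_triplets (text : String) (index : Int) (out : Int) : Prop := out = count_vowel_triplets_alt text index
instance (text : String) (index : Int) (out : Int) : Decidable (Spec_count_vowel_triplets text index out) := by unfold Spec_count_vowel_triplets; infer_instance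

-- ===== CLAIM (what is proved, stated in full; the proofs are below) =====
def Claim_equal_count_vowel_triplets : Prop := ∀ (text : String) (index : Int), Dom_count_vowel_triplets text index → Spec_count_vowel_triplets text index (count_vowel_triplets text index)

-- ===== LEMMAS AND PROOFS =====

def pvIsV (ch : Char) : Bool := "aeiouy".toList.contains ch

lemma pvSetContains_eq (ch : Char) : PySem.Set.contains pvVowelsA ch = pvIsV ch := by
  have hv : pvVowelsA = "aeiouy".toList := by decide
  show PySem.Set.contains pvVowelsA ch = List.contains "aeiouy".toList ch
  rw [hv]
  simp only [PySem.Set.contains]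

lemma pvMem_iff (ch : Char) : ch ∈ pvVowelsA ↔ pvIsV ch = true := by
  have hv : pvVowelsA = "aeiouy".toList := by decide
  rw [hv, pvIsV]
  simp

-- structural restatement of A's helper on the dropped suffix
def pvHL : List Char → Int
  | a :: b :: c :: r => if pvIsV a && pvIsV b && pvIsV c then 1 + pvHL r else pvHL (b :: c :: r)
  | _ => 0

lemma pvHL_short (l : List Char) (h : l.length < 3) : pvHL l = 0 := by
  match l with
  | [] => rfl
  | [_] => rfl
  | [_, _] => rfl
  | _ :: _ :: _ :: _ => simp at h; omega

lemma pvHelperA_eq_hL (t : List Char) (i : Nat) : pvHelperA t i = pvHL (t.drop i) := by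
  fun_induction pvHelperA t i with
  | case1 i h =>
    exact (pvHL_short _ (by simp; omega)).symm
  | case2 i h triplet hall ih =>
    have hle : i + 3 ≤ t.length := by omega
    have hslice : PySem.List.slice t (some (i : Int)) (some ((i : Int) + 3)) =
        (t.drop i).take 3 := by
      rw [PySem.List.slice_toNat t (Int.natCast_nonneg i) (by positivity)]
      have e1 : ((i : Int)).toNat = i := by omega
      have e2 : (((i : Int) + 3)).toNat = i + 3 := by omega
      rw [e1, e2, Nat.add_sub_cancel_left]
    obtain ⟨a, b, c, r, hd⟩ : ∃ a b c r, t.drop i = a :: b :: c :: r := by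
      have h3 : 3 ≤ (t.drop i).length := by simp; omega
      match hm : t.drop i with
      | a :: b :: c :: r => exact ⟨a, b, c, r, rfl⟩
      | [] | [_] | [_, _] => rw [hm] at h3; simp at h3
    have hdrop3 : t.drop (i + 3) = r := by
      rw [← List.drop_drop, hd]; simp
    obtain ⟨ha, hb, hc⟩ : pvIsV a = true ∧ pvIsV b = true ∧ pvIsV c = true := by
      have hall' : ((a :: b :: c :: r).take 3).all
          (fun ch => PySem.Set.contains pvVowelsA ch) = true := by
        rw [← hd, ← hslice]; exact hall
      simpa [pvSetContains_eq, pvMem_iff] using hall'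
    rw [ih, hdrop3, hd]
    simp [pvHL, ha, hb, hc]
  | case3 i h triplet hall ih =>
    have hle : i + 3 ≤ t.length := by omega
    have hslice : PySem.List.slice t (some (i : Int)) (some ((i : Int) + 3)) =
        (t.drop i).take 3 := by
      rw [PySem.List.slice_toNat t (Int.natCast_nonneg i) (by positivity)]
      have e1 : ((i : Int)).toNat = i := by omega
      have e2 : (((i : Int) + 3)).toNat = i + 3 := by omega
      rw [e1, e2, Nat.add_sub_cancel_left]
    obtain ⟨a, b, c, r, hd⟩ : ∃ a b c r, t.drop i = a :: b :: c :: r := by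
      have h3 : 3 ≤ (t.drop i).length := by simp; omega
      match hm : t.drop i with
      | a :: b :: c :: r => exact ⟨a, b, c, r, rfl⟩
      | [] | [_] | [_, _] => rw [hm] at h3; simp at h3
    have hdrop1 : t.drop (i + 1) = b :: c :: r := by
      rw [← List.drop_drop, hd]; simp
    have hall' : ¬ ((a :: b :: c :: r).take 3).all
        (fun ch => PySem.Set.contains pvVowelsA ch) = true := by
      rw [← hd, ← hslice]; exact hall
    have hcond : (pvIsV a && pvIsV b && pvIsV c) = false := by
      cases hx : (pvIsV a && pvIsV b && pvIsV c)
      · rfl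
      · obtain ⟨⟨hxa, hxb⟩, hxc⟩ := by simpa using hx
        exact absurd (by simp [pvMem_iff, hxa, hxb, hxc]) hall'
    rw [ih, hdrop1, hd, pvHL, if_neg (by simp [hcond])]

lemma pvStepB_vowel (st : Int × Int) (ch : Char) (h : pvIsV ch = true) :
    pvStepB st ch = if st.1 + 1 == 3 then (0, st.2 + 1) else (st.1 + 1, st.2) := by
  rw [pvIsV] at h
  simp only [pvStepB]
  rw [if_pos h]

lemma pvStepB_nonvowel (st : Int × Int) (ch : Char) (h : pvIsV ch = false) :
    pvStepB st ch = (0, st.2) := by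
  rw [pvIsV] at h
  simp only [pvStepB]
  rw [if_neg (fun hx => by rw [hx] at h; exact absurd h (by decide))]

lemma pvFold_acc (l : List Char) (s c : Int) :
    (l.foldl pvStepB (s, c)).2 = c + (l.foldl pvStepB (s, 0)).2 := by
  induction l generalizing s c with
  | nil => simp
  | cons a l ih =>
    simp only [List.foldl_cons, pvStepB]
    split
    · split
      · simp only [ih 0 (c + 1), ih 0 (0 + 1)]; ring
      · exact ih _ _
    · exact ih _ _

lemma pvFold_streak1 (b c : Char) (r : List Char) (h : ¬(pvIsV b && pvIsV c) = true) :
    ((b :: c :: r).foldl pvStepB (1, 0)).2 = ((b :: c :: r).foldl pvStepB (0, 0)).2 := by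
  by_cases hb : pvIsV b = true
  · have hc : pvIsV c = false := by
      cases hcv : pvIsV c <;> simp [hb, hcv] at h ⊢
    have e1 : pvStepB (1, 0) b = (2, 0) := by rw [pvStepB_vowel _ _ hb]; norm_num
    have e0 : pvStepB (0, 0) b = (1, 0) := by rw [pvStepB_vowel _ _ hb]; norm_num
    have f1 : pvStepB (2, 0) c = (0, 0) := pvStepB_nonvowel _ _ hc
    have f0 : pvStepB (1, 0) c = (0, 0) := pvStepB_nonvowel _ _ hc
    simp only [List.foldl_cons, e1, e0, f1, f0]
  · have hb' : pvIsV b = false := by simpa using hb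
    have g1 : pvStepB (1, 0) b = (0, 0) := by rw [pvStepB_nonvowel _ _ hb']
    have g0 : pvStepB (0, 0) b = (0, 0) := by rw [pvStepB_nonvowel _ _ hb']
    simp only [List.foldl_cons, g1, g0]

lemma pvHL_eq_fold (l : List Char) : pvHL l = (l.foldl pvStepB (0, 0)).2 := by
  fun_induction pvHL l with
  | case1 a b c r hv ih =>
    obtain ⟨⟨ha, hb⟩, hc⟩ : (pvIsV a = true ∧ pvIsV b = true) ∧ pvIsV c = true := by
      simpa using hv
    have e1 : pvStepB (0, 0) a = (1, 0) := by rw [pvStepB_vowel _ _ ha]; norm_num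
    have e2 : pvStepB (1, 0) b = (2, 0) := by rw [pvStepB_vowel _ _ hb]; norm_num
    have e3 : pvStepB (2, 0) c = (0, 1) := by rw [pvStepB_vowel _ _ hc]; norm_num
    rw [List.foldl_cons, e1, List.foldl_cons, e2, List.foldl_cons, e3,
      pvFold_acc r 0 1, ih]
  | case2 a b c r hv ih =>
    by_cases ha : pvIsV a = true
    · have hbc : ¬(pvIsV b && pvIsV c) = true := by
        intro hb
        obtain ⟨hb1, hb2⟩ := by simpa using hb
        exact hv (by simp [ha, hb1, hb2])
      have e1 : pvStepB (0, 0) a = (1, 0) := by rw [pvStepB_vowel _ _ ha]; norm_num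
      rw [show ((a :: b :: c :: r).foldl pvStepB (0, 0)) = ((b :: c :: r).foldl pvStepB (1, 0))
          from by rw [List.foldl_cons, e1], pvFold_streak1 b c r hbc]
      exact ih
    · have ha' : pvIsV a = false := by simpa using ha
      have g0 : pvStepB (0, 0) a = (0, 0) := by rw [pvStepB_nonvowel _ _ ha']
      rw [show ((a :: b :: c :: r).foldl pvStepB (0, 0)) = ((b :: c :: r).foldl pvStepB (0, 0))
          from by rw [List.foldl_cons, g0]]
      exact ih
  | case3 l hl =>
    match l, hl with
    | [], _ => rfl
    | a :: b :: c :: r, hl => exact (hl a b c r rfl).elim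
    | [a], _ =>
      by_cases h : pvIsV a = true
      · rw [List.foldl_cons, pvStepB_vowel _ _ h]; norm_num [pvHL]
      · rw [List.foldl_cons, pvStepB_nonvowel _ _ (by simpa using h)]; rfl
    | [a, b], _ =>
      by_cases ha : pvIsV a = true
      · have e1 : pvStepB (0, 0) a = (1, 0) := by rw [pvStepB_vowel _ _ ha]; norm_num
        by_cases hb : pvIsV b = true
        · rw [List.foldl_cons, e1, List.foldl_cons, pvStepB_vowel _ _ hb]; norm_num [pvHL]
        · rw [List.foldl_cons, e1, List.foldl_cons,
            pvStepB_nonvowel _ _ (by simpa using hb)]; rfl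
      · have e1 : pvStepB (0, 0) a = (0, 0) := pvStepB_nonvowel _ _ (by simpa using ha)
        by_cases hb : pvIsV b = true
        · rw [List.foldl_cons, e1, List.foldl_cons, pvStepB_vowel _ _ hb]; norm_num [pvHL]
        · rw [List.foldl_cons, e1, List.foldl_cons,
            pvStepB_nonvowel _ _ (by simpa using hb)]; rfl

-- ===== VERDICT (by name: the statement is the Claim_ definition above) =====
theorem count_vowel_triplets_spec : Claim_equal_count_vowel_triplets := by
  intro text index _
  unfold Spec_count_vowel_triplets count_vowel_triplets count_vowel_triplets_alt
  rw [pvHelperA_eq_hL, List.drop_zero, pvHL_eq_fold]
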